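-- pv_equiv track=rewrite | github.com/Connoriginal/Learning-Python | assignments/slidingpuzzle_classver.py | set_goal_board
-- ===== SOURCE A (Python) =====
-- def set_goal_board(size):
--     goal_board = []
--     count = 0
--     for board in range(0,size):
--         board = []
--         for i in range(0,size):
--             i = int(i)
--             board.append(i+size*count)
--         goal_board.append(board)
--         count = count + 1
--     return goal_board
-- ===== SOURCE B (Python) =====
-- def set_goal_board(size):
--     rows = max(size, 0)
--     flat = list(range(rows * rows))
--     return [flat[r * size:(r + 1) * size] for r in range(size)]
-- ===== Notes on version B (the rewrite author's own statement) =====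
-- stated objective: alternative
-- what changed: B generates the flat row-major sequence 0..size*size-1 once and reshapes it into rows by slicing, replacing A's nested per-cell loop with its running count variable.
import Mathlib
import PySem

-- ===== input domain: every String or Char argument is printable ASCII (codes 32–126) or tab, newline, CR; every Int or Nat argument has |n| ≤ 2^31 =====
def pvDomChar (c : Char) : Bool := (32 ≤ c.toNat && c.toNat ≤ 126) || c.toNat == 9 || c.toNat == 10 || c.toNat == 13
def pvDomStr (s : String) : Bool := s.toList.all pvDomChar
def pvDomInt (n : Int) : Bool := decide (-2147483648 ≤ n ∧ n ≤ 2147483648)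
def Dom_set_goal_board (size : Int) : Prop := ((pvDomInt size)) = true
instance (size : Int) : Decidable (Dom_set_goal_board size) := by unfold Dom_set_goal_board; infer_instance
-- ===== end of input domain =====

-- B builds the flat sequence 0..size*size-1 once and slices it into rows, instead of A's nested per-cell loop with a count accumulator; return values agree for every int size.


-- ===== PORT A =====
-- A-side helper: the inner 'for i in range(0,size): board.append(i+size*count)' loop
def pvRowA (size c : Int) : List Int :=
  (PySem.List.pyRange 0 size 1).foldl (fun b i => b ++ [i + size * c]) []

def set_goal_board (size : Int) : List (List Int) :=
  ((PySem.List.pyRange 0 size 1).foldl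
    (fun (st : List (List Int) × Int) _ => (st.1 ++ [pvRowA size st.2], st.2 + 1))
    ([], 0)).1

-- ===== PORT B =====
def set_goal_board_alt (size : Int) : List (List Int) :=
  let rows := max size 0
  let flat := PySem.List.pyRange 0 (rows * rows) 1
  (PySem.List.pyRange 0 size 1).map fun r =>
    PySem.List.slice flat (some (r * size)) (some ((r + 1) * size))

-- ===== PRECONDITION & SPEC =====
def Spec_set_goal_board (size : Int) (out : List (List Int)) : Prop := out = set_goal_board_alt size
instance (size : Int) (out : List (List Int)) : Decidable (Spec_set_goal_board size out) := by unfold Spec_set_goal_board; infer_instance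

-- ===== CLAIM (what is proved, stated in full; the proofs are below) =====
def Claim_equal_set_goal_board : Prop := ∀ (size : Int), Dom_set_goal_board size → Spec_set_goal_board size (set_goal_board size)

-- ===== LEMMAS AND PROOFS =====

-- A's outer loop: the count accumulator makes row c produce g c, independently of the loop variable.
lemma foldl_rows (g : Int → List Int) (l : List Int) (acc : List (List Int)) (c : Int) :
    l.foldl (fun (st : List (List Int) × Int) _ => (st.1 ++ [g st.2], st.2 + 1)) (acc, c)
      = (acc ++ (List.range l.length).map (fun k : Nat => g (c + (k : Int))),
         c + (l.length : Int)) := by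
  induction l generalizing acc c with
  | nil => simp
  | cons x xs ih =>
    rw [List.foldl_cons, ih]
    refine Prod.ext ?_ ?_
    · simp only [List.append_assoc, List.length_cons]
      congr 1
      rw [List.range_succ_eq_map, List.map_cons, List.map_map, ← List.singleton_append]
      simp
      intro a _
      congr 1
      ring
    · simp only [List.length_cons]
      push_cast
      ring

-- a slice of range(0,m) with in-range bounds is the corresponding subrange
lemma slice_pyRange (m a b : Int) (h0 : 0 ≤ a) (hab : a ≤ b) (hbm : b ≤ m) :
    PySem.List.slice (PySem.List.pyRange 0 m 1) (some a) (some b)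
      = PySem.List.pyRange a b 1 := by
  rw [PySem.List.slice_toNat _ h0 (le_trans h0 hab)]
  rw [PySem.List.pyRange_one_append 0 a m h0 (le_trans hab hbm),
      PySem.List.pyRange_one_append a b m hab hbm]
  rw [show a.toNat = (PySem.List.pyRange 0 a 1).length by
        simp [PySem.List.length_pyRange_one]]
  rw [List.drop_left]
  apply List.take_left'
  simp [PySem.List.length_pyRange_one]
  omega

-- ===== VERDICT (by name: the statement is the Claim_ definition above) =====
theorem set_goal_board_spec : Claim_equal_set_goal_board := by
  intro size _
  unfold Spec_set_goal_board
  simp only [set_goal_board, set_goal_board_alt]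
  rw [foldl_rows (pvRowA size)]
  simp only [List.nil_append]
  conv_rhs => rw [PySem.List.pyRange_one 0 size]
  rw [List.map_map]
  rw [show (PySem.List.pyRange 0 size 1).length = (size - 0).toNat from
        PySem.List.length_pyRange_one 0 size]
  simp only [sub_zero]
  apply List.map_congr_left
  intro k hk
  simp only [List.mem_range] at hk
  have hsz : 0 < size := by omega
  have hk' : (k : Int) < size := by omega
  have h1 : (0:Int) ≤ (k : Int) * size := by positivity
  have h2 : (k : Int) * size ≤ ((k : Int) + 1) * size := by nlinarith
  have h3 : ((k : Int) + 1) * size ≤ size * size := by nlinarith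
  simp only [Function.comp, zero_add, pvRowA]
  rw [PySem.List.foldl_append_singleton_eq_map, List.nil_append]
  rw [show max size 0 = size from max_eq_left hsz.le]
  rw [slice_pyRange (size * size) ((k:Int) * size) (((k:Int) + 1) * size) h1 h2 h3]
  rw [PySem.List.pyRange_one 0 size, PySem.List.pyRange_one ((k:Int) * size) (((k:Int)+1) * size)]
  rw [List.map_map]
  rw [show (((k:Int)+1) * size - (k:Int) * size) = size by ring]
  simp only [sub_zero]
  apply List.map_congr_left
  intro j _
  simp only [Function.comp_apply]
  ring
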